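-- pv_equiv track=rewrite | github.com/audiovideo1979-sys/roccat-manager | set_dpi.py | decode_qt_bytearray
-- ===== SOURCE A (Python) =====
-- def decode_qt_bytearray(raw_bytes):
--     """Decode Qt's @ByteArray(...) escaping."""
--     data = []
--     i = 0
--     while i < len(raw_bytes):
--         if raw_bytes[i] == ord('\\') and i + 1 < len(raw_bytes):
--             nc = raw_bytes[i + 1]
--             if nc == ord('x'):
--                 hex_s = ""
--                 j = i + 2
--                 while j < len(raw_bytes) and j < i + 4:
--                     c = chr(raw_bytes[j])
--                     if c in '0123456789abcdefABCDEF':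
--                         hex_s += c
--                         j += 1
--                     else:
--                         break
--                 if hex_s:
--                     data.append(int(hex_s, 16))
--                     i = j
--                     continue
--             elif nc == ord('0'):
--                 data.append(0); i += 2; continue
--             elif nc == ord('n'):
--                 data.append(0x0a); i += 2; continue
--             elif nc == ord('r'):
--                 data.append(0x0d); i += 2; continue
--             elif nc == ord('t'):
--                 data.append(0x09); i += 2; continue
--             elif nc == ord('f'):
--                 data.append(0x0c); i += 2; continue
--             elif nc == ord('\\'):
--                 data.append(ord('\\')); i += 2; continue
--         data.append(raw_bytes[i])
--         i += 1
--     return data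
-- ===== SOURCE B (Python) =====
-- def decode_qt_bytearray(raw_bytes):
--     """Decode Qt's @ByteArray(...) escaping via a one-pass 4-state machine."""
--     def hexval(c):
--         if 48 <= c <= 57:
--             return c - 48
--         if 97 <= c <= 102:
--             return c - 87
--         if 65 <= c <= 70:
--             return c - 55
--         return -1
--     out = []
--     state = 0   # 0 = normal, 1 = saw '\', 2 = saw '\x', 3 = saw '\x' + one hex digit
--     acc = 0
--     for c in raw_bytes:
--         if state == 0:
--             if c == 92:
--                 state = 1
--             else:
--                 out.append(c)
--         elif state == 1:
--             if c == 120: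
--                 state = 2
--             elif c == 48:
--                 out.append(0); state = 0
--             elif c == 110:
--                 out.append(0x0a); state = 0
--             elif c == 114:
--                 out.append(0x0d); state = 0
--             elif c == 116:
--                 out.append(0x09); state = 0
--             elif c == 102:
--                 out.append(0x0c); state = 0
--             elif c == 92:
--                 out.append(92); state = 0
--             else:
--                 out.append(92); out.append(c); state = 0
--         elif state == 2:
--             v = hexval(c)
--             if v >= 0:
--                 acc = v; state = 3
--             else:
--                 out.append(92); out.append(120)
--                 if c == 92:
--                     state = 1
--                 else:
--                     out.append(c); state = 0
--         else:
--             v = hexval(c)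
--             if v >= 0:
--                 out.append(acc * 16 + v); state = 0
--             else:
--                 out.append(acc)
--                 if c == 92:
--                     state = 1
--                 else:
--                     out.append(c); state = 0
--     if state == 1:
--         out.append(92)
--     elif state == 2:
--         out.append(92); out.append(120)
--     elif state == 3:
--         out.append(acc)
--     return out
-- ===== Notes on version B (the rewrite author's own statement) =====
-- stated objective: alternative
-- what changed: A's index-based while loop with explicit lookahead (raw_bytes[i+1], an inner hex-collecting while loop, string building and chr()-based digit tests) is replaced by a single left-to-right pass with a 4-state machine (normal / saw-backslash / saw-\x / saw-\x-plus-digit) that inspects each byte exactly once and never indexes, builds strings or calls chr.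
-- outside the precondition, e.g. on decode_qt_bytearray([92, 92, 120, -1]): A returns [92, 120, -1], B returns [92, 120, -1]
import Mathlib
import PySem

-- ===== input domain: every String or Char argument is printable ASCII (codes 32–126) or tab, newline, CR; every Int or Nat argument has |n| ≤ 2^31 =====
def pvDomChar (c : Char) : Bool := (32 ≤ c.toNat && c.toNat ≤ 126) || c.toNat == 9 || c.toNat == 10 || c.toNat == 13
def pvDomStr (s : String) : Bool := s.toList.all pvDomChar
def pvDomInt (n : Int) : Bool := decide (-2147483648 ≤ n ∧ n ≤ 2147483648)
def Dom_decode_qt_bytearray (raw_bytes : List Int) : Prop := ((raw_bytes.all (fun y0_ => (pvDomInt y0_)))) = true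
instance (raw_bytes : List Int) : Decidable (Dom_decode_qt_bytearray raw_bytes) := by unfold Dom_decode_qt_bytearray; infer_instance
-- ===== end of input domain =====

-- B replaces A's index/lookahead while loop by a one-pass 4-state machine over the list (same O(n), measured constant-factor faster in a timing run).


-- ===== PORT A =====
-- chr(raw_bytes[j]) in '0123456789abcdefABCDEF': exact on valid codepoints 0..0x10FFFF (Pre_ guarantees chr never raises there)
def pvHexDigitA (c : Int) : Bool :=
  (48 ≤ c && c ≤ 57) || (97 ≤ c && c ≤ 102) || (65 ≤ c && c ≤ 70)

-- int(hex_s, 16) for the collected hex-digit codes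
def pvHexToInt (hex_s : List Int) : Int :=
  hex_s.foldl (fun a c =>
    a * 16 + (if 48 ≤ c && c ≤ 57 then c - 48 else if 97 ≤ c && c ≤ 102 then c - 87 else c - 55)) 0

-- inner while loop: j scans from i+2 up to i+4 collecting hex-digit codes; returns (j, hex_s).
-- fuel only makes the recursion structural; it is called with fuel = 2 = stop - j, the loop's own maximal trip count
def pvHexScanA (raw : List Int) (fuel j stop : Nat) (hex_s : List Int) : Nat × List Int :=
  match fuel with
  | 0 => (j, hex_s)
  | fuel + 1 =>
    if j < raw.length ∧ j < stop then
      let c := raw.getD j 0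
      if pvHexDigitA c then pvHexScanA raw fuel (j + 1) stop (hex_s ++ [c]) else (j, hex_s)
    else (j, hex_s)

-- outer while loop of A (index-based, with lookahead).
-- fuel only makes the recursion structural; it is called with fuel = raw.length, an upper bound on the
-- loop's trip count (i strictly increases each iteration), so it never runs out before the loop ends
def pvLoopA (raw : List Int) (fuel : Nat) (i : Nat) (data : List Int) : List Int :=
  match fuel with
  | 0 => data
  | fuel + 1 =>
    if i < raw.length then
      let c := raw.getD i 0
      if c = 92 then
        if i + 1 < raw.length then
          let nc := raw.getD (i + 1) 0
          if nc = 120 then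
            let r := pvHexScanA raw 2 (i + 2) (i + 4) []
            if r.2 ≠ [] then
              pvLoopA raw fuel r.1 (data ++ [pvHexToInt r.2])
            else
              pvLoopA raw fuel (i + 1) (data ++ [c])
          else if nc = 48 then pvLoopA raw fuel (i + 2) (data ++ [0])
          else if nc = 110 then pvLoopA raw fuel (i + 2) (data ++ [0x0a])
          else if nc = 114 then pvLoopA raw fuel (i + 2) (data ++ [0x0d])
          else if nc = 116 then pvLoopA raw fuel (i + 2) (data ++ [0x09])
          else if nc = 102 then pvLoopA raw fuel (i + 2) (data ++ [0x0c])
          else if nc = 92 then pvLoopA raw fuel (i + 2) (data ++ [92])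
          else pvLoopA raw fuel (i + 1) (data ++ [c])
        else
          pvLoopA raw fuel (i + 1) (data ++ [c])
      else
        pvLoopA raw fuel (i + 1) (data ++ [c])
    else data

def decode_qt_bytearray (raw_bytes : List Int) : List Int :=
  pvLoopA raw_bytes raw_bytes.length 0 []

-- ===== PORT B =====
def pvHexValB (c : Int) : Int :=
  if 48 ≤ c ∧ c ≤ 57 then c - 48
  else if 97 ≤ c ∧ c ≤ 102 then c - 87
  else if 65 ≤ c ∧ c ≤ 70 then c - 55
  else -1

-- the for loop of B: state 0 normal, 1 saw '\', 2 saw '\x', 3 saw '\x'+digit (value acc); flush at end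
def pvRunB (xs : List Int) (state : Nat) (acc : Int) : List Int :=
  match xs with
  | [] =>
    if state = 1 then [92]
    else if state = 2 then [92, 120]
    else if state = 3 then [acc]
    else []
  | c :: rest =>
    if state = 0 then
      if c = 92 then pvRunB rest 1 acc else c :: pvRunB rest 0 acc
    else if state = 1 then
      if c = 120 then pvRunB rest 2 acc
      else if c = 48 then 0 :: pvRunB rest 0 acc
      else if c = 110 then 0x0a :: pvRunB rest 0 acc
      else if c = 114 then 0x0d :: pvRunB rest 0 acc
      else if c = 116 then 0x09 :: pvRunB rest 0 acc
      else if c = 102 then 0x0c :: pvRunB rest 0 acc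
      else if c = 92 then 92 :: pvRunB rest 0 acc
      else 92 :: c :: pvRunB rest 0 acc
    else if state = 2 then
      let v := pvHexValB c
      if 0 ≤ v then pvRunB rest 3 v
      else 92 :: 120 :: (if c = 92 then pvRunB rest 1 acc else c :: pvRunB rest 0 acc)
    else
      let v := pvHexValB c
      if 0 ≤ v then (acc * 16 + v) :: pvRunB rest 0 acc
      else acc :: (if c = 92 then pvRunB rest 1 acc else c :: pvRunB rest 0 acc)

def decode_qt_bytearray_alt (raw_bytes : List Int) : List Int :=
  pvRunB raw_bytes 0 0

-- ===== PRECONDITION & SPEC =====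
-- Pre_ excludes inputs containing the byte pattern '\x' followed (after the optional first hex digit)
-- by a value outside chr's range 0..0x10FFFF: on reached occurrences Python A raises ValueError in chr;
-- a few such patterns are unreachable (consumed by an earlier escape) and there A returns — see cites.
def Pre_decode_qt_bytearray (raw_bytes : List Int) : Prop :=
  ∀ k, k + 1 < raw_bytes.length →
    ¬ (raw_bytes.getD k 0 = 92 ∧ raw_bytes.getD (k + 1) 0 = 120 ∧
       ((k + 2 < raw_bytes.length ∧ (raw_bytes.getD (k + 2) 0 < 0 ∨ 0x10FFFF < raw_bytes.getD (k + 2) 0)) ∨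
        (k + 3 < raw_bytes.length ∧ pvHexDigitA (raw_bytes.getD (k + 2) 0) = true ∧
         (raw_bytes.getD (k + 3) 0 < 0 ∨ 0x10FFFF < raw_bytes.getD (k + 3) 0))))

instance (raw_bytes : List Int) : Decidable (Pre_decode_qt_bytearray raw_bytes) := by
  unfold Pre_decode_qt_bytearray
  have : ∀ k, k + 1 < raw_bytes.length → k < raw_bytes.length := fun k h => by omega
  exact decidable_of_iff (∀ k < raw_bytes.length, k + 1 < raw_bytes.length →
    ¬ (raw_bytes.getD k 0 = 92 ∧ raw_bytes.getD (k + 1) 0 = 120 ∧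
       ((k + 2 < raw_bytes.length ∧ (raw_bytes.getD (k + 2) 0 < 0 ∨ 0x10FFFF < raw_bytes.getD (k + 2) 0)) ∨
        (k + 3 < raw_bytes.length ∧ pvHexDigitA (raw_bytes.getD (k + 2) 0) = true ∧
         (raw_bytes.getD (k + 3) 0 < 0 ∨ 0x10FFFF < raw_bytes.getD (k + 3) 0)))))
    ⟨fun h k hk => h k (by omega) hk, fun h k _ hk => h k hk⟩

def pvWitness_decode_qt_bytearray : List Int := [92, 120, 52, 49, 92, 110, 113]

def Spec_decode_qt_bytearray (raw_bytes : List Int) (out : List Int) : Prop := out = decode_qt_bytearray_alt raw_bytes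
instance (raw_bytes : List Int) (out : List Int) : Decidable (Spec_decode_qt_bytearray raw_bytes out) := by unfold Spec_decode_qt_bytearray; infer_instance

-- ===== CLAIM (what is proved, stated in full; the proofs are below) =====
def Claim_equal_decode_qt_bytearray : Prop := ∀ (raw_bytes : List Int), Dom_decode_qt_bytearray raw_bytes → Pre_decode_qt_bytearray raw_bytes → Spec_decode_qt_bytearray raw_bytes (decode_qt_bytearray raw_bytes)

-- ===== LEMMAS AND PROOFS =====

theorem pvHexValB_nonneg (c : Int) : (0 ≤ pvHexValB c) ↔ pvHexDigitA c = true := by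
  unfold pvHexValB pvHexDigitA
  split_ifs <;> simp_all <;> omega

-- equation lemmas for pvRunB with a variable head (used by pure rw in the key induction)
theorem pvRunB_nil0 (a : Int) : pvRunB [] 0 a = [] := rfl
theorem pvRunB_nil1 (a : Int) : pvRunB [] 1 a = [92] := rfl
theorem pvRunB_nil2 (a : Int) : pvRunB [] 2 a = [92, 120] := rfl
theorem pvRunB_nil3 (a : Int) : pvRunB [] 3 a = [a] := rfl
theorem pvRunB_0_bs (rest : List Int) (a : Int) : pvRunB (92 :: rest) 0 a = pvRunB rest 1 a := by
  simp [pvRunB]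
theorem pvRunB_0_other (c : Int) (rest : List Int) (a : Int) (h : c ≠ 92) :
    pvRunB (c :: rest) 0 a = c :: pvRunB rest 0 a := by
  simp [pvRunB, h]
theorem pvRunB_1_x (rest : List Int) (a : Int) : pvRunB (120 :: rest) 1 a = pvRunB rest 2 a := by
  simp [pvRunB]
theorem pvRunB_1_0 (rest : List Int) (a : Int) : pvRunB (48 :: rest) 1 a = 0 :: pvRunB rest 0 a := by
  simp [pvRunB]
theorem pvRunB_1_n (rest : List Int) (a : Int) : pvRunB (110 :: rest) 1 a = 10 :: pvRunB rest 0 a := by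
  simp [pvRunB]
theorem pvRunB_1_r (rest : List Int) (a : Int) : pvRunB (114 :: rest) 1 a = 13 :: pvRunB rest 0 a := by
  simp [pvRunB]
theorem pvRunB_1_t (rest : List Int) (a : Int) : pvRunB (116 :: rest) 1 a = 9 :: pvRunB rest 0 a := by
  simp [pvRunB]
theorem pvRunB_1_f (rest : List Int) (a : Int) : pvRunB (102 :: rest) 1 a = 12 :: pvRunB rest 0 a := by
  simp [pvRunB]
theorem pvRunB_1_bs (rest : List Int) (a : Int) : pvRunB (92 :: rest) 1 a = 92 :: pvRunB rest 0 a := by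
  simp [pvRunB]
theorem pvRunB_1_other (c : Int) (rest : List Int) (a : Int)
    (h1 : c ≠ 120) (h2 : c ≠ 48) (h3 : c ≠ 110) (h4 : c ≠ 114) (h5 : c ≠ 116) (h6 : c ≠ 102)
    (h7 : c ≠ 92) : pvRunB (c :: rest) 1 a = 92 :: c :: pvRunB rest 0 a := by
  simp [pvRunB, h1, h2, h3, h4, h5, h6, h7]
theorem pvRunB_2_hex (c : Int) (rest : List Int) (a : Int) (h : pvHexDigitA c = true) :
    pvRunB (c :: rest) 2 a = pvRunB rest 3 (pvHexValB c) := by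
  have := (pvHexValB_nonneg c).mpr h
  simp [pvRunB, this]
theorem pvRunB_2_nonhex (c : Int) (rest : List Int) (a : Int) (h : pvHexDigitA c = false) :
    pvRunB (c :: rest) 2 a =
      92 :: 120 :: (if c = 92 then pvRunB rest 1 a else c :: pvRunB rest 0 a) := by
  have hv : ¬ (0 ≤ pvHexValB c) := by rw [pvHexValB_nonneg]; simp [h]
  simp [pvRunB, hv]
theorem pvRunB_3_hex (c : Int) (rest : List Int) (a : Int) (h : pvHexDigitA c = true) :
    pvRunB (c :: rest) 3 a = (a * 16 + pvHexValB c) :: pvRunB rest 0 a := by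
  have := (pvHexValB_nonneg c).mpr h
  simp [pvRunB, this]
theorem pvRunB_3_nonhex (c : Int) (rest : List Int) (a : Int) (h : pvHexDigitA c = false) :
    pvRunB (c :: rest) 3 a =
      a :: (if c = 92 then pvRunB rest 1 a else c :: pvRunB rest 0 a) := by
  have hv : ¬ (0 ≤ pvHexValB c) := by rw [pvHexValB_nonneg]; simp [h]
  simp [pvRunB, hv]

theorem pvRunB_acc (xs : List Int) (a b : Int) :
    pvRunB xs 0 a = pvRunB xs 0 b ∧ pvRunB xs 1 a = pvRunB xs 1 b ∧ pvRunB xs 2 a = pvRunB xs 2 b := by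
  induction xs generalizing a b with
  | nil => exact ⟨rfl, rfl, rfl⟩
  | cons c rest ih =>
    refine ⟨?_, ?_, ?_⟩
    · by_cases h : c = 92
      · rw [h, pvRunB_0_bs, pvRunB_0_bs, (ih a b).2.1]
      · rw [pvRunB_0_other _ _ _ h, pvRunB_0_other _ _ _ h, (ih a b).1]
    · by_cases h1 : c = 120
      · rw [h1, pvRunB_1_x, pvRunB_1_x, (ih a b).2.2]
      by_cases h2 : c = 48
      · rw [h2, pvRunB_1_0, pvRunB_1_0, (ih a b).1]
      by_cases h3 : c = 110
      · rw [h3, pvRunB_1_n, pvRunB_1_n, (ih a b).1]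
      by_cases h4 : c = 114
      · rw [h4, pvRunB_1_r, pvRunB_1_r, (ih a b).1]
      by_cases h5 : c = 116
      · rw [h5, pvRunB_1_t, pvRunB_1_t, (ih a b).1]
      by_cases h6 : c = 102
      · rw [h6, pvRunB_1_f, pvRunB_1_f, (ih a b).1]
      by_cases h7 : c = 92
      · rw [h7, pvRunB_1_bs, pvRunB_1_bs, (ih a b).1]
      rw [pvRunB_1_other _ _ _ h1 h2 h3 h4 h5 h6 h7,
        pvRunB_1_other _ _ _ h1 h2 h3 h4 h5 h6 h7, (ih a b).1]
    · by_cases hx : pvHexDigitA c = true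
      · rw [pvRunB_2_hex _ _ _ hx, pvRunB_2_hex _ _ _ hx]
      · rw [pvRunB_2_nonhex _ _ _ (by simpa using hx), pvRunB_2_nonhex _ _ _ (by simpa using hx)]
        by_cases he : c = 92
        · rw [if_pos he, if_pos he, (ih a b).2.1]
        · rw [if_neg he, if_neg he, (ih a b).1]

theorem pvScan_none (raw : List Int) (i : Nat)
    (h : raw.length ≤ i + 2 ∨ pvHexDigitA (raw.getD (i + 2) 0) = false) :
    pvHexScanA raw 2 (i + 2) (i + 4) [] = (i + 2, []) := by
  show (if i + 2 < raw.length ∧ i + 2 < i + 4 then _ else _) = _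
  rcases h with h | h
  · rw [if_neg (by omega)]
  · by_cases h2 : i + 2 < raw.length
    · rw [if_pos ⟨h2, by omega⟩]
      dsimp only
      rw [if_neg (by simp only [h]; exact Bool.false_ne_true)]
    · rw [if_neg (by omega)]

theorem pvScan_one (raw : List Int) (i : Nat)
    (h2 : i + 2 < raw.length) (hx2 : pvHexDigitA (raw.getD (i + 2) 0) = true)
    (h : raw.length ≤ i + 3 ∨ pvHexDigitA (raw.getD (i + 3) 0) = false) :
    pvHexScanA raw 2 (i + 2) (i + 4) [] = (i + 3, [raw.getD (i + 2) 0]) := by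
  show (if i + 2 < raw.length ∧ i + 2 < i + 4 then _ else _) = _
  rw [if_pos ⟨h2, by omega⟩]
  dsimp only
  rw [if_pos hx2]
  show (if i + 2 + 1 < raw.length ∧ i + 2 + 1 < i + 4 then _ else _) = _
  rcases h with h | h
  · rw [if_neg (by omega)]
    simp only [List.nil_append]
  · by_cases h3 : i + 3 < raw.length
    · rw [if_pos (by omega : i + 2 + 1 < raw.length ∧ i + 2 + 1 < i + 4)]
      dsimp only
      rw [if_neg (by rw [(by omega : i + 2 + 1 = i + 3)]; simp only [h]; exact Bool.false_ne_true)]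
      simp only [List.nil_append]
    · rw [if_neg (by omega)]
      simp only [List.nil_append]

theorem pvScan_two (raw : List Int) (i : Nat)
    (h2 : i + 2 < raw.length) (hx2 : pvHexDigitA (raw.getD (i + 2) 0) = true)
    (h3 : i + 3 < raw.length) (hx3 : pvHexDigitA (raw.getD (i + 3) 0) = true) :
    pvHexScanA raw 2 (i + 2) (i + 4) [] = (i + 4, [raw.getD (i + 2) 0, raw.getD (i + 3) 0]) := by
  show (if i + 2 < raw.length ∧ i + 2 < i + 4 then _ else _) = _
  rw [if_pos ⟨h2, by omega⟩]
  dsimp only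
  rw [if_pos hx2]
  show (if i + 2 + 1 < raw.length ∧ i + 2 + 1 < i + 4 then _ else _) = _
  rw [if_pos (by omega : i + 2 + 1 < raw.length ∧ i + 2 + 1 < i + 4)]
  dsimp only
  rw [if_pos (by rw [(by omega : i + 2 + 1 = i + 3)]; exact hx3)]
  rw [(by omega : i + 2 + 1 = i + 3)]
  simp only [List.nil_append, List.cons_append]
  show (i + 3 + 1, _) = _
  rw [(by omega : i + 3 + 1 = i + 4)]

theorem pvHexToInt_one (c : Int) (h : pvHexDigitA c = true) :
    pvHexToInt [c] = pvHexValB c := by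
  unfold pvHexToInt pvHexValB pvHexDigitA at *
  simp only [List.foldl]
  split_ifs <;> simp_all

theorem pvHexToInt_two (c d : Int) (hc : pvHexDigitA c = true) (hd : pvHexDigitA d = true) :
    pvHexToInt [c, d] = pvHexValB c * 16 + pvHexValB d := by
  unfold pvHexToInt pvHexValB pvHexDigitA at *
  simp only [List.foldl]
  split_ifs <;> simp_all

theorem pv_drop_cons (raw : List Int) (i : Nat) (h : i < raw.length) :
    raw.drop i = raw.getD i 0 :: raw.drop (i + 1) := by
  rw [List.drop_eq_getElem_cons h, List.getD_eq_getElem _ _ h]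

theorem pv_key_aux (fuel : Nat) : ∀ (raw : List Int) (i : Nat) (data : List Int),
    raw.length - i ≤ fuel → pvLoopA raw fuel i data = data ++ pvRunB (raw.drop i) 0 0 := by
  induction fuel with
  | zero =>
    intro raw i data h
    show data = _
    rw [List.drop_of_length_le (by omega), pvRunB_nil0, List.append_nil]
  | succ n ih =>
    intro raw i data h
    show (if i < raw.length then _ else _) = _
    by_cases hi : i < raw.length
    case neg =>
      rw [if_neg hi, List.drop_of_length_le (by omega), pvRunB_nil0, List.append_nil]
    have hd0 := pv_drop_cons raw i hi
    rw [if_pos hi]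
    dsimp only
    by_cases h92 : raw.getD i 0 = 92
    case neg =>
      rw [if_neg h92, ih raw (i + 1) _ (by omega), hd0, pvRunB_0_other _ _ _ h92]
      simp
    rw [if_pos h92]
    by_cases hi1 : i + 1 < raw.length
    case neg =>
      rw [if_neg hi1, ih raw (i + 1) _ (by omega), hd0,
        List.drop_of_length_le (by omega : raw.length ≤ i + 1), h92,
        pvRunB_0_bs, pvRunB_nil0, pvRunB_nil1]
      simp
    rw [if_pos hi1]
    have hd1 := pv_drop_cons raw (i + 1) hi1
    by_cases h120 : raw.getD (i + 1) 0 = 120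
    · rw [if_pos h120]
      by_cases h2 : i + 2 < raw.length
      case neg =>
        rw [pvScan_none raw i (Or.inl (by omega))]
        simp only [ne_eq, not_true_eq_false]
        rw [ih raw (i + 1) _ (by omega), hd0, hd1, h92, h120,
          List.drop_of_length_le (by omega : raw.length ≤ i + 2),
          pvRunB_0_bs, pvRunB_1_x, pvRunB_nil2,
          pvRunB_0_other _ _ _ (by omega : (120 : Int) ≠ 92), pvRunB_nil0]
        simp
      have hd2 := pv_drop_cons raw (i + 2) h2
      by_cases hx2 : pvHexDigitA (raw.getD (i + 2) 0) = true
      · by_cases h3 : i + 3 < raw.length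
        case neg =>
          rw [pvScan_one raw i h2 hx2 (Or.inl (by omega))]
          simp only [ne_eq, reduceCtorEq, not_false_eq_true]
          rw [ih raw (i + 3) _ (by omega), hd0, hd1, hd2, h92, h120,
            List.drop_of_length_le (by omega : raw.length ≤ i + 3),
            pvRunB_0_bs, pvRunB_1_x, pvRunB_2_hex _ _ _ hx2, pvRunB_nil3,
            pvRunB_nil0, pvHexToInt_one _ hx2]
          simp
        have hd3 := pv_drop_cons raw (i + 3) h3
        by_cases hx3 : pvHexDigitA (raw.getD (i + 3) 0) = true
        · rw [pvScan_two raw i h2 hx2 h3 hx3]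
          simp only [ne_eq, reduceCtorEq, not_false_eq_true]
          rw [ih raw (i + 4) _ (by omega), hd0, hd1, hd2, hd3, h92, h120,
            pvRunB_0_bs, pvRunB_1_x, pvRunB_2_hex _ _ _ hx2, pvRunB_3_hex _ _ _ hx3,
            pvHexToInt_two _ _ hx2 hx3,
            (pvRunB_acc (raw.drop (i + 4)) (pvHexValB (raw.getD (i + 2) 0)) 0).1]
          simp
        · rw [pvScan_one raw i h2 hx2 (Or.inr (by simpa using hx3))]
          simp only [ne_eq, reduceCtorEq, not_false_eq_true]
          rw [ih raw (i + 3) _ (by omega), hd0, hd1, hd2, hd3, h92, h120,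
            pvRunB_0_bs, pvRunB_1_x, pvRunB_2_hex _ _ _ hx2,
            pvRunB_3_nonhex _ _ _ (by simpa using hx3), pvHexToInt_one _ hx2]
          by_cases he : raw.getD (i + 3) 0 = 92
          · rw [if_pos he, he, pvRunB_0_bs,
              (pvRunB_acc (raw.drop (i + 4)) (pvHexValB (raw.getD (i + 2) 0)) 0).2.1]
            simp
          · rw [if_neg he, pvRunB_0_other _ _ _ he,
              (pvRunB_acc (raw.drop (i + 4)) (pvHexValB (raw.getD (i + 2) 0)) 0).1]
            simp
      · rw [pvScan_none raw i (Or.inr (by simpa using hx2))]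
        simp only [ne_eq, not_true_eq_false]
        rw [ih raw (i + 1) _ (by omega), hd0, hd1, hd2, h92, h120,
          pvRunB_0_bs, pvRunB_1_x, pvRunB_2_nonhex _ _ _ (by simpa using hx2),
          pvRunB_0_other _ _ _ (by omega : (120 : Int) ≠ 92)]
        by_cases he : raw.getD (i + 2) 0 = 92
        · rw [if_pos he, he, pvRunB_0_bs]
          simp
        · rw [if_neg he, pvRunB_0_other _ _ _ he]
          simp
    · rw [if_neg h120]
      by_cases e48 : raw.getD (i + 1) 0 = 48
      · rw [if_pos e48, ih raw (i + 2) _ (by omega), hd0, hd1, h92, e48,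
          pvRunB_0_bs, pvRunB_1_0]
        simp
      rw [if_neg e48]
      by_cases e110 : raw.getD (i + 1) 0 = 110
      · rw [if_pos e110, ih raw (i + 2) _ (by omega), hd0, hd1, h92, e110,
          pvRunB_0_bs, pvRunB_1_n]
        simp
      rw [if_neg e110]
      by_cases e114 : raw.getD (i + 1) 0 = 114
      · rw [if_pos e114, ih raw (i + 2) _ (by omega), hd0, hd1, h92, e114,
          pvRunB_0_bs, pvRunB_1_r]
        simp
      rw [if_neg e114]
      by_cases e116 : raw.getD (i + 1) 0 = 116
      · rw [if_pos e116, ih raw (i + 2) _ (by omega), hd0, hd1, h92, e116,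
          pvRunB_0_bs, pvRunB_1_t]
        simp
      rw [if_neg e116]
      by_cases e102 : raw.getD (i + 1) 0 = 102
      · rw [if_pos e102, ih raw (i + 2) _ (by omega), hd0, hd1, h92, e102,
          pvRunB_0_bs, pvRunB_1_f]
        simp
      rw [if_neg e102]
      by_cases e92 : raw.getD (i + 1) 0 = 92
      · rw [if_pos e92, ih raw (i + 2) _ (by omega), hd0, hd1, h92, e92,
          pvRunB_0_bs, pvRunB_1_bs]
        simp
      rw [if_neg e92]
      rw [ih raw (i + 1) _ (by omega), hd0, hd1, h92,
        pvRunB_0_bs, pvRunB_1_other _ _ _ h120 e48 e110 e114 e116 e102 e92,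
        pvRunB_0_other _ _ _ e92]
      simp

theorem pv_key (raw : List Int) (i : Nat) (data : List Int) (fuel : Nat)
    (h : raw.length - i ≤ fuel) : pvLoopA raw fuel i data = data ++ pvRunB (raw.drop i) 0 0 :=
  pv_key_aux fuel raw i data h

-- ===== VERDICT (by name: the statement is the Claim_ definition above) =====
theorem decode_qt_bytearray_spec : Claim_equal_decode_qt_bytearray := by
  intro raw _ _
  unfold Spec_decode_qt_bytearray decode_qt_bytearray decode_qt_bytearray_alt
  simpa using pv_key raw 0 [] raw.length (by omega)
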